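-- pv_equiv track=rewrite | github.com/naloui1/test_18_10_2023 | jeux_mots.py | derniere_consonne
-- ===== SOURCE A (Python) =====
-- def derniere_consonne(mot):
--     i=len(mot)-1
--     while (i>-1):
--         if mot[i] not in 'aeiouy':
--             indice=i
--             break
--         else:
--             i=i-1
--     return indice,mot[indice]
-- ===== SOURCE B (Python) =====
-- def derniere_consonne(mot):
--     # forward full scan keeping the last consonant index seen; indice stays
--     # unbound (NameError) when the word has no consonant, as in A
--     for i in range(len(mot)):
--         if mot[i] not in 'aeiouy':
--             indice = i
--     return indice, mot[indice]
-- ===== Notes on version B (the rewrite author's own statement) =====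
-- stated objective: alternative
-- what changed: Replaces A's backward while-loop with early break by a single forward scan that overwrites the kept index at every consonant, so the loop runs to the end and the last assignment wins.
import Mathlib
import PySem

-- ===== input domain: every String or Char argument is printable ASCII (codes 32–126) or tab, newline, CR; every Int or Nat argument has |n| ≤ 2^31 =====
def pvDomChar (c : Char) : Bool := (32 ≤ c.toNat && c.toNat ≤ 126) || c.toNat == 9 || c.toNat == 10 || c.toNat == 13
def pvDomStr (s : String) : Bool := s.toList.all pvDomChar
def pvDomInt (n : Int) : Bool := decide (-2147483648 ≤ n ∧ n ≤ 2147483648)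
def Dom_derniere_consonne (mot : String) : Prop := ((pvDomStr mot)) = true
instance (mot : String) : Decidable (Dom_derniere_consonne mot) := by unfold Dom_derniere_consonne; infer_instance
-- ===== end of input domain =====

-- B replaces A's backward early-break scan by a forward scan keeping the last consonant index (alternative decomposition, same cost).

-- ===== PORT A =====
-- A's while loop: i runs len-1, len-2, …; fuel n means i = n-1; returns the index
-- where the break fires, none if the loop falls through (indice unbound → UnboundLocalError, excluded by Pre_).
def dcLoopA (cs : List Char) : Nat → Option Int
  | 0 => none
  | n + 1 =>
    match cs[n]? with
    | none => none          -- unreachable: n < cs.length at every call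
    | some c => if c ∈ "aeiouy".toList then dcLoopA cs n else some (n : Int)

def derniere_consonne (mot : String) : Int × String :=
  match dcLoopA mot.toList mot.toList.length with
  | some i =>
    match PySem.Str.pyGet? mot i with
    | some c => (i, String.mk [c])
    | none => (i, "")       -- unreachable
  | none => (0, "")         -- Python raises UnboundLocalError here (outside Pre_)

-- ===== PORT B =====
-- forward for-loop over enumerate, overwriting the kept index at every consonant
def derniere_consonne_alt (mot : String) : Int × String :=
  let r := (PySem.List.enumerate mot.toList 0).foldl
      (fun acc p => if p.2 ∈ "aeiouy".toList then acc else some p.1) none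
  match r with
  | some i =>
    match PySem.Str.pyGet? mot i with
    | some c => (i, String.mk [c])
    | none => (i, "")       -- unreachable
  | none => (0, "")         -- Python raises NameError here (outside Pre_)

-- ===== PRECONDITION & SPEC =====
-- Pre_ excludes exactly the inputs (empty or all-vowel words) on which A raises
-- UnboundLocalError (B raises NameError there too).
def Pre_derniere_consonne (mot : String) : Prop :=
  (mot.toList.any (fun c => !("aeiouy".toList.contains c))) = true
instance (mot : String) : Decidable (Pre_derniere_consonne mot) := by
  unfold Pre_derniere_consonne; infer_instance
def pvWitness_derniere_consonne : String := "bac"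

def Spec_derniere_consonne (mot : String) (out : Int × String) : Prop := out = derniere_consonne_alt mot
instance (mot : String) (out : Int × String) : Decidable (Spec_derniere_consonne mot out) := by unfold Spec_derniere_consonne; infer_instance

-- ===== CLAIM (what is proved, stated in full; the proofs are below) =====
def Claim_equal_derniere_consonne : Prop := ∀ (mot : String), Dom_derniere_consonne mot → Pre_derniere_consonne mot → Spec_derniere_consonne mot (derniere_consonne mot)

-- ===== LEMMAS AND PROOFS =====

-- A's backward scan over the first n characters equals B's forward fold over them.
theorem dcLoopA_eq_fold (cs : List Char) (n : Nat) (hn : n ≤ cs.length) :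
    dcLoopA cs n
      = (PySem.List.enumerate (cs.take n) 0).foldl
          (fun acc p => if p.2 ∈ "aeiouy".toList then acc else some p.1) none := by
  induction n with
  | zero => simp [dcLoopA, PySem.List.enumerate_nil]
  | succ n ih =>
    have hlt : n < cs.length := hn
    have htake : cs.take (n + 1) = cs.take n ++ [cs[n]] :=
      List.take_succ_eq_append_getElem hlt
    rw [htake, PySem.List.enumerate_append, List.foldl_append]
    have hlen : (cs.take n).length = n := List.length_take_of_le (le_of_lt hlt)
    simp only [hlen, PySem.List.enumerate_cons, PySem.List.enumerate_nil, List.foldl]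
    rw [← ih (le_of_lt hlt)]
    simp [dcLoopA, List.getElem?_eq_getElem hlt]

-- ===== VERDICT (by name: the statement is the Claim_ definition above) =====
theorem derniere_consonne_spec : Claim_equal_derniere_consonne := by
  intro mot _ _
  unfold Spec_derniere_consonne derniere_consonne derniere_consonne_alt
  rw [dcLoopA_eq_fold mot.toList mot.toList.length le_rfl, List.take_length]
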